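-- pv_equiv track=rewrite | github.com/prithika-sathish/Sales-Lead-Automation | intelligence/lead_engine.py | _deterministic_score
-- ===== SOURCE A (Python) =====
-- from typing import Any
--
-- HIGH_INTENT_TYPES = {
--     "hiring_spike",
--     "infra_scaling",
--     "integration_added",
--     "product_launch",
--     "sales_expansion",
--     "growth_phase",
--     "platform_expansion",
--     "dev_activity",
-- }
--
-- def _deterministic_score(company_row: dict[str, Any], signals: list[dict[str, Any]]) -> int:
--     unique_types = {str(sig.get("signal_type") or "") for sig in signals if str(sig.get("signal_type") or "")}
--     high_intent_count = sum(1 for item in unique_types if item in HIGH_INTENT_TYPES)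
--     score = 0
--
--     if "infra_scaling" in unique_types:
--         score += 25
--     if "hiring_spike" in unique_types:
--         score += 25
--     if "growth_phase" in unique_types:
--         score += 20
--     if "integration_added" in unique_types:
--         score += 15
--     if "product_launch" in unique_types:
--         score += 15
--     if "sales_expansion" in unique_types:
--         score += 15
--     if "customer_pain" in unique_types or "product_gap" in unique_types:
--         score += 10
--     if "momentum" in unique_types or "high_momentum" in unique_types or "viral_growth" in unique_types:
--         score += 10
--     if high_intent_count >= 2:
--         score += 20
--     if len(unique_types) >= 5:
--         score += 10
--     if company_row.get("derived_signals"):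
--         score = max(score, 50)
--
--     return max(0, min(100, score))
-- ===== SOURCE B (Python) =====
-- from typing import Any
--
-- HIGH_INTENT_TYPES = {
--     "hiring_spike",
--     "infra_scaling",
--     "integration_added",
--     "product_launch",
--     "sales_expansion",
--     "growth_phase",
--     "platform_expansion",
--     "dev_activity",
-- }
--
-- # Each scoring trigger type maps to a bucket; a bucket's points are awarded at most once,
-- # which reproduces the OR-groups (customer_pain/product_gap, momentum/high_momentum/viral_growth).
-- _BUCKET = {
--     "infra_scaling": "infra",
--     "hiring_spike": "hiring",
--     "growth_phase": "growth",
--     "integration_added": "integration",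
--     "product_launch": "launch",
--     "sales_expansion": "sales",
--     "customer_pain": "pain",
--     "product_gap": "pain",
--     "momentum": "momentum",
--     "high_momentum": "momentum",
--     "viral_growth": "momentum",
-- }
-- _PTS = {"infra": 25, "hiring": 25, "growth": 20, "integration": 15,
--         "launch": 15, "sales": 15, "pain": 10, "momentum": 10}
--
-- def _deterministic_score(company_row: dict[str, Any], signals: list[dict[str, Any]]) -> int:
--     seen: set = set()
--     buckets: set = set()
--     high = 0
--     score = 0
--     for sig in signals:
--         t = str(sig.get("signal_type") or "")
--         if not t or t in seen:
--             continue
--         seen.add(t)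
--         if t in HIGH_INTENT_TYPES:
--             high += 1
--         b = _BUCKET.get(t)
--         if b is not None and b not in buckets:
--             buckets.add(b)
--             score += _PTS[b]
--     if high >= 2:
--         score += 20
--     if len(seen) >= 5:
--         score += 10
--     if company_row.get("derived_signals"):
--         score = max(score, 50)
--     return max(0, min(100, score))
-- ===== Notes on version B (the rewrite author's own statement) =====
-- stated objective: alternative
-- what changed: Replaces A's build-a-set-then-run-eight-membership-tests scoring with a single streaming pass over the signals that maintains seen-types, seen-buckets, a high-intent counter and a running score, awarding each bucket's points (via a type-to-bucket dictionary) the first time any of its trigger types appears.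
import Mathlib
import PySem

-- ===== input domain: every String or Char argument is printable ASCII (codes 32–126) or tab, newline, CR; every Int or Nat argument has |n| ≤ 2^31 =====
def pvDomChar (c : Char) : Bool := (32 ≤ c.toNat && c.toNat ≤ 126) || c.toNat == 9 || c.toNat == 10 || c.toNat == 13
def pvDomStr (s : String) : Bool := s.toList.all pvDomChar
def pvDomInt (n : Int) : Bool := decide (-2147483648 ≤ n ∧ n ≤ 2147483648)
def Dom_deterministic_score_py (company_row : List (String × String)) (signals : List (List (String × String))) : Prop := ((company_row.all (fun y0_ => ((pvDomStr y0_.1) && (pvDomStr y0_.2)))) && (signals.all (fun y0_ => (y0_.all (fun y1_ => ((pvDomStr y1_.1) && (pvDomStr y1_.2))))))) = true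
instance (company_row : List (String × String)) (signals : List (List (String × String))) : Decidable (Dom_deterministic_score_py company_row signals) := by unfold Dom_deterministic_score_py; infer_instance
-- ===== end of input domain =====

-- B replaces A's build-the-type-set-then-run-eight-membership-tests scoring with one streaming
-- pass over the signals that keeps seen types, seen buckets (via a type→bucket dictionary), a
-- high-intent counter and a running score (objective: alternative).

-- shared helpers (code both Pythons contain verbatim)
-- dict.get k (first match in the association list), as Option
def pvGet? (d : List (String × String)) (k : String) : Option String :=
  (d.find? (fun p => p.1 == k)).map (·.2)

-- Python truthiness of company_row.get("derived_signals"): None and "" are falsy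
def pvTruthy (o : Option String) : Bool := (o.getD "") != ""

-- the module constant HIGH_INTENT_TYPES (a Python set literal)
def pvHIGH : PySem.Set String :=
  PySem.Set.ofList ["hiring_spike", "infra_scaling", "integration_added", "product_launch",
    "sales_expansion", "growth_phase", "platform_expansion", "dev_activity"]

-- str(sig.get("signal_type") or "")
def pvType (sig : List (String × String)) : String := (pvGet? sig "signal_type").getD ""

-- ===== PORT A =====
-- {str(sig.get("signal_type") or "") for sig in signals if str(sig.get("signal_type") or "")}
def pvUniqueTypes (signals : List (List (String × String))) : PySem.Set String :=
  PySem.Set.ofList ((signals.map pvType).filter (fun t => t != ""))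

def deterministic_score_py (company_row : List (String × String)) (signals : List (List (String × String))) : Int :=
  let unique_types := pvUniqueTypes signals
  let high_intent_count : Int :=
    unique_types.foldl (fun acc item => if pvHIGH.contains item then acc + 1 else acc) 0
  let score : Int := 0
  let score := if unique_types.contains "infra_scaling" then score + 25 else score
  let score := if unique_types.contains "hiring_spike" then score + 25 else score
  let score := if unique_types.contains "growth_phase" then score + 20 else score
  let score := if unique_types.contains "integration_added" then score + 15 else score
  let score := if unique_types.contains "product_launch" then score + 15 else score
  let score := if unique_types.contains "sales_expansion" then score + 15 else score
  let score := if unique_types.contains "customer_pain" || unique_types.contains "product_gap"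
    then score + 10 else score
  let score := if unique_types.contains "momentum" || unique_types.contains "high_momentum"
      || unique_types.contains "viral_growth" then score + 10 else score
  let score := if high_intent_count ≥ 2 then score + 20 else score
  let score := if PySem.Set.len unique_types ≥ 5 then score + 10 else score
  let score := if pvTruthy (pvGet? company_row "derived_signals") then max score 50 else score
  max 0 (min 100 score)

-- ===== PORT B =====
-- the module constant _BUCKET (type → bucket dictionary)
def pvBUCKET : PySem.Dict String String := ⟨[
  ("infra_scaling", "infra"), ("hiring_spike", "hiring"), ("growth_phase", "growth"),
  ("integration_added", "integration"), ("product_launch", "launch"), ("sales_expansion", "sales"),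
  ("customer_pain", "pain"), ("product_gap", "pain"),
  ("momentum", "momentum"), ("high_momentum", "momentum"), ("viral_growth", "momentum")]⟩

-- the module constant _PTS (bucket → points); _PTS[b] is total on _BUCKET's values, ported as getD 0
def pvPTS (b : String) : Int :=
  (PySem.Dict.get? (⟨[("infra", 25), ("hiring", 25), ("growth", 20), ("integration", 15),
    ("launch", 15), ("sales", 15), ("pain", 10), ("momentum", 10)]⟩ : PySem.Dict String Int) b).getD 0

-- the body of B's for-loop, on the state (seen, buckets, high, score)
def pvStep (st : PySem.Set String × PySem.Set String × Int × Int) (t : String) :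
    PySem.Set String × PySem.Set String × Int × Int :=
  if t == "" || st.1.contains t then st
  else
    let seen := PySem.Set.add st.1 t
    let high := if pvHIGH.contains t then st.2.2.1 + 1 else st.2.2.1
    match pvBUCKET.get? t with
    | none => (seen, st.2.1, high, st.2.2.2)
    | some b =>
      if st.2.1.contains b then (seen, st.2.1, high, st.2.2.2)
      else (seen, PySem.Set.add st.2.1 b, high, st.2.2.2 + pvPTS b)

def deterministic_score_py_alt (company_row : List (String × String)) (signals : List (List (String × String))) : Int :=
  let st := signals.foldl (fun st sig => pvStep st (pvType sig))
    (PySem.Set.empty, PySem.Set.empty, 0, 0)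
  let score := st.2.2.2
  let score := if st.2.2.1 ≥ 2 then score + 20 else score
  let score := if PySem.Set.len st.1 ≥ 5 then score + 10 else score
  let score := if pvTruthy (pvGet? company_row "derived_signals") then max score 50 else score
  max 0 (min 100 score)

-- ===== PRECONDITION & SPEC =====
def Spec_deterministic_score_py (company_row : List (String × String)) (signals : List (List (String × String))) (out : Int) : Prop := out = deterministic_score_py_alt company_row signals
instance (company_row : List (String × String)) (signals : List (List (String × String))) (out : Int) : Decidable (Spec_deterministic_score_py company_row signals out) := by unfold Spec_deterministic_score_py; infer_instance

-- ===== CLAIM (what is proved, stated in full; the proofs are below) =====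
def Claim_equal_deterministic_score_py : Prop := ∀ (company_row : List (String × String)) (signals : List (List (String × String))), Dom_deterministic_score_py company_row signals → Spec_deterministic_score_py company_row signals (deterministic_score_py company_row signals)

-- ===== LEMMAS AND PROOFS =====

-- the filtered (non-empty) type list of a processed prefix
def pvGood (p : List String) : List String := p.filter (fun t => t != "")
def pvBks (p : List String) : PySem.Set String :=
  PySem.Set.ofList ((pvGood p).filterMap (fun t => pvBUCKET.get? t))
def pvState (p : List String) : PySem.Set String × PySem.Set String × Int × Int :=
  (PySem.Set.ofList (pvGood p),
   pvBks p,
   ((PySem.Set.ofList (pvGood p)).countP (fun t => pvHIGH.contains t) : Int),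
   ((pvBks p).map pvPTS).sum)

theorem pv_ofList_append_singleton {α : Type} [BEq α] (l : List α) (x : α) :
    PySem.Set.ofList (l ++ [x]) = PySem.Set.add (PySem.Set.ofList l) x := by
  rw [PySem.Set.ofList, List.foldl_append]; rfl

theorem pv_mem_bks (p : List String) (n : String) :
    n ∈ pvBks p ↔ ∃ t ∈ pvGood p, pvBUCKET.get? t = some n := by
  simp [pvBks, PySem.Set.mem_ofList, List.mem_filterMap]

theorem pv_good_append (p : List String) (t : String) (ht : t ≠ "") :
    pvGood (p ++ [t]) = pvGood p ++ [t] := by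
  simp [pvGood, List.filter_append, ht]

theorem pv_step_state (p : List String) (t : String) :
    pvStep (pvState p) t = pvState (p ++ [t]) := by
  by_cases ht : t = ""
  · subst ht
    simp [pvStep, pvState, pvGood, pvBks, List.filter_append]
  · have hg : pvGood (p ++ [t]) = pvGood p ++ [t] := pv_good_append p t ht
    by_cases hmem : t ∈ PySem.Set.ofList (pvGood p)
    · -- duplicate type: the whole step is a no-op
      have hc : (PySem.Set.ofList (pvGood p)).contains t = true :=
        List.contains_iff_mem.mpr hmem
      have hset : PySem.Set.ofList (pvGood (p ++ [t])) = PySem.Set.ofList (pvGood p) := by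
        rw [hg, pv_ofList_append_singleton, PySem.Set.add, if_pos hc]
      have hbm : pvBUCKET.get? t = none ∨
          ∃ b, pvBUCKET.get? t = some b ∧ b ∈ pvBks p := by
        cases hb : pvBUCKET.get? t with
        | none => exact Or.inl rfl
        | some b =>
          exact Or.inr ⟨b, rfl, (pv_mem_bks p b).mpr ⟨t, (PySem.Set.mem_ofList _ _).mp hmem, hb⟩⟩
      have hbks : pvBks (p ++ [t]) = pvBks p := by
        unfold pvBks
        rw [hg, List.filterMap_append]
        rcases hbm with hb | ⟨b, hb, hbmem⟩
        · simp [hb]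
        · have hcb : (PySem.Set.ofList ((pvGood p).filterMap (fun t => pvBUCKET.get? t))).contains b = true := by
            apply List.contains_iff_mem.mpr
            unfold pvBks at hbmem
            exact hbmem
          simp only [hb, List.filterMap_cons, List.filterMap_nil]
          rw [pv_ofList_append_singleton, PySem.Set.add, if_pos hcb]
      simp only [pvStep, pvState, hc, Bool.or_true, if_true]
      rw [hset, hbks]
    · -- new type
      have hc : (PySem.Set.ofList (pvGood p)).contains t = false := by
        rw [Bool.eq_false_iff]
        intro h
        exact hmem (List.contains_iff_mem.mp h)
      have hguard : (t == "" || (PySem.Set.ofList (pvGood p)).contains t) = false := by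
        rw [hc, Bool.or_false, beq_eq_false_iff_ne]
        exact ht
      have hseen : PySem.Set.ofList (pvGood (p ++ [t])) = PySem.Set.ofList (pvGood p) ++ [t] := by
        rw [hg, pv_ofList_append_singleton, PySem.Set.add, hc]; simp
      have hadd : (PySem.Set.ofList (pvGood p)).add t = PySem.Set.ofList (pvGood p) ++ [t] := by
        rw [PySem.Set.add, hc]; simp
      have hcount : (((PySem.Set.ofList (pvGood (p ++ [t]))).countP
            (fun x => pvHIGH.contains x) : Nat) : Int)
          = if pvHIGH.contains t
            then (((PySem.Set.ofList (pvGood p)).countP (fun x => pvHIGH.contains x) : Nat) : Int) + 1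
            else (((PySem.Set.ofList (pvGood p)).countP (fun x => pvHIGH.contains x) : Nat) : Int) := by
        rw [hseen, List.countP_append]
        by_cases hh : pvHIGH.contains t = true
        · rw [if_pos hh]
          simp only [List.countP_cons, List.countP_nil, hh]
          push_cast; ring
        · rw [if_neg hh]
          simp only [List.countP_cons, List.countP_nil, if_neg hh]
          push_cast; ring
      simp only [pvStep, pvState]
      rw [if_neg (show ¬((t == "" || (PySem.Set.ofList (pvGood p)).contains t) = true) by
        rw [hguard]; exact Bool.false_ne_true)]
      rw [hcount, hseen, hadd]
      cases hb : pvBUCKET.get? t with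
      | none =>
        have hbks : pvBks (p ++ [t]) = pvBks p := by
          unfold pvBks; rw [hg, List.filterMap_append]; simp [hb]
        simp only [hbks]
      | some b =>
        by_cases hbmem : b ∈ pvBks p
        · have hcb : (pvBks p).contains b = true := List.contains_iff_mem.mpr hbmem
          have hbks : pvBks (p ++ [t]) = pvBks p := by
            unfold pvBks
            rw [hg, List.filterMap_append]
            simp only [hb, List.filterMap_cons, List.filterMap_nil]
            rw [pv_ofList_append_singleton, PySem.Set.add,
              if_pos (show (PySem.Set.ofList ((pvGood p).filterMap (fun t => pvBUCKET.get? t))).contains b = true from hcb)]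
          simp only [hbks, hcb, if_true]
        · have hcb : (pvBks p).contains b = false := by
            rw [Bool.eq_false_iff]; intro h; exact hbmem (List.contains_iff_mem.mp h)
          have hbks : pvBks (p ++ [t]) = pvBks p ++ [b] := by
            unfold pvBks
            rw [hg, List.filterMap_append]
            simp only [hb, List.filterMap_cons, List.filterMap_nil]
            rw [pv_ofList_append_singleton, PySem.Set.add,
              (show (PySem.Set.ofList ((pvGood p).filterMap (fun t => pvBUCKET.get? t))).contains b = false from hcb)]
            simp
          simp only [hbks, hcb, Bool.false_eq_true, if_false]
          simp [PySem.Set.add]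
          exact hbmem

theorem pv_fold_state (ts : List String) (p : List String) :
    ts.foldl pvStep (pvState p) = pvState (p ++ ts) := by
  induction ts generalizing p with
  | nil => simp
  | cons t ts ih =>
    rw [List.foldl_cons, pv_step_state, ih]
    simp

theorem pv_sum_ite_filter (s : List String) (names : List String) :
    (names.map (fun n => if n ∈ s then pvPTS n else 0)).sum
      = ((names.filter (fun n => decide (n ∈ s))).map pvPTS).sum := by
  induction names with
  | nil => simp
  | cons n ns ih => by_cases h : n ∈ s <;> simp [h, ih]

theorem pv_sum_over_names (names : List String) (hnd : names.Nodup) (s : List String)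
    (hs : s.Nodup) (hsub : ∀ x ∈ s, x ∈ names) :
    (s.map pvPTS).sum = (names.map (fun n => if n ∈ s then pvPTS n else 0)).sum := by
  rw [pv_sum_ite_filter]
  have hperm : (names.filter (fun n => decide (n ∈ s))).Perm s := by
    apply (List.perm_ext_iff_of_nodup (hnd.filter _) hs).mpr
    intro x
    simp only [List.mem_filter, decide_eq_true_eq]
    exact ⟨fun h => h.2, fun h => ⟨hsub x h, h⟩⟩
  exact ((hperm.map pvPTS).sum_eq).symm

theorem pv_bval_mem (t n : String) (h : pvBUCKET.get? t = some n) :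
    n ∈ ["infra", "hiring", "growth", "integration", "launch", "sales", "pain", "momentum"] := by
  have h' := PySem.Dict.mem_items_of_get?_eq_some _ h
  simp [pvBUCKET] at h'
  rcases h' with ⟨_, h⟩ | ⟨_, h⟩ | ⟨_, h⟩ | ⟨_, h⟩ | ⟨_, h⟩ | ⟨_, h⟩ | ⟨_, h⟩ | ⟨_, h⟩ | ⟨_, h⟩ | ⟨_, h⟩ | ⟨_, h⟩ <;>
    subst h <;> decide

theorem pv_bks_infra (p : List String) :
    "infra" ∈ pvBks p ↔ "infra_scaling" ∈ pvGood p := by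
  rw [pv_mem_bks]
  constructor
  · rintro ⟨t, ht, hb⟩
    rw [PySem.Dict.get?_eq_some_iff_mem_items _ _ _ (by decide)] at hb
    simp [pvBUCKET] at hb
    exact hb ▸ ht
  · intro h; exact ⟨_, h, by decide⟩
theorem pv_bks_hiring (p : List String) :
    "hiring" ∈ pvBks p ↔ "hiring_spike" ∈ pvGood p := by
  rw [pv_mem_bks]
  constructor
  · rintro ⟨t, ht, hb⟩
    rw [PySem.Dict.get?_eq_some_iff_mem_items _ _ _ (by decide)] at hb
    simp [pvBUCKET] at hb
    exact hb ▸ ht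
  · intro h; exact ⟨_, h, by decide⟩

theorem pv_bks_growth (p : List String) :
    "growth" ∈ pvBks p ↔ "growth_phase" ∈ pvGood p := by
  rw [pv_mem_bks]
  constructor
  · rintro ⟨t, ht, hb⟩
    rw [PySem.Dict.get?_eq_some_iff_mem_items _ _ _ (by decide)] at hb
    simp [pvBUCKET] at hb
    exact hb ▸ ht
  · intro h; exact ⟨_, h, by decide⟩

theorem pv_bks_integration (p : List String) :
    "integration" ∈ pvBks p ↔ "integration_added" ∈ pvGood p := by
  rw [pv_mem_bks]
  constructor
  · rintro ⟨t, ht, hb⟩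
    rw [PySem.Dict.get?_eq_some_iff_mem_items _ _ _ (by decide)] at hb
    simp [pvBUCKET] at hb
    exact hb ▸ ht
  · intro h; exact ⟨_, h, by decide⟩

theorem pv_bks_launch (p : List String) :
    "launch" ∈ pvBks p ↔ "product_launch" ∈ pvGood p := by
  rw [pv_mem_bks]
  constructor
  · rintro ⟨t, ht, hb⟩
    rw [PySem.Dict.get?_eq_some_iff_mem_items _ _ _ (by decide)] at hb
    simp [pvBUCKET] at hb
    exact hb ▸ ht
  · intro h; exact ⟨_, h, by decide⟩

theorem pv_bks_sales (p : List String) :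
    "sales" ∈ pvBks p ↔ "sales_expansion" ∈ pvGood p := by
  rw [pv_mem_bks]
  constructor
  · rintro ⟨t, ht, hb⟩
    rw [PySem.Dict.get?_eq_some_iff_mem_items _ _ _ (by decide)] at hb
    simp [pvBUCKET] at hb
    exact hb ▸ ht
  · intro h; exact ⟨_, h, by decide⟩

theorem pv_bks_pain (p : List String) :
    "pain" ∈ pvBks p ↔ "customer_pain" ∈ pvGood p ∨ "product_gap" ∈ pvGood p := by
  rw [pv_mem_bks]
  constructor
  · rintro ⟨t, ht, hb⟩
    rw [PySem.Dict.get?_eq_some_iff_mem_items _ _ _ (by decide)] at hb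
    simp [pvBUCKET] at hb
    rcases hb with h | h
    · exact Or.inl (h ▸ ht)
    · exact Or.inr (h ▸ ht)
  · rintro (h | h)
    · exact ⟨_, h, by decide⟩
    · exact ⟨_, h, by decide⟩

theorem pv_bks_momentum (p : List String) :
    "momentum" ∈ pvBks p ↔
      "momentum" ∈ pvGood p ∨ "high_momentum" ∈ pvGood p ∨ "viral_growth" ∈ pvGood p := by
  rw [pv_mem_bks]
  constructor
  · rintro ⟨t, ht, hb⟩
    rw [PySem.Dict.get?_eq_some_iff_mem_items _ _ _ (by decide)] at hb
    simp [pvBUCKET] at hb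
    rcases hb with h | h | h
    · exact Or.inl (h ▸ ht)
    · exact Or.inr (Or.inl (h ▸ ht))
    · exact Or.inr (Or.inr (h ▸ ht))
  · rintro (h | h | h)
    · exact ⟨_, h, by decide⟩
    · exact ⟨_, h, by decide⟩
    · exact ⟨_, h, by decide⟩

theorem pv_ite_add_shift' (c : Prop) [Decidable c] (s k : Int) :
    (if c then s + k else s) = s + (if c then k else 0) := by
  split <;> simp

theorem pv_equiv (company_row : List (String × String)) (signals : List (List (String × String))) :
    deterministic_score_py company_row signals = deterministic_score_py_alt company_row signals := by
  unfold deterministic_score_py deterministic_score_py_alt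
  rw [← List.foldl_map (f := pvType) (g := pvStep)]
  have hinit : ((PySem.Set.empty, PySem.Set.empty, (0 : Int), (0 : Int)) :
      PySem.Set String × PySem.Set String × Int × Int) = pvState [] := by
    simp [pvState, pvGood, pvBks, PySem.Set.ofList, PySem.Set.empty]
  rw [hinit, pv_fold_state, List.nil_append]
  have hu : pvUniqueTypes signals = PySem.Set.ofList (pvGood (signals.map pvType)) := rfl
  have hsum : ((pvBks (signals.map pvType)).map pvPTS).sum
      = ((["infra", "hiring", "growth", "integration", "launch", "sales", "pain", "momentum"] :
          List String).map (fun n => if n ∈ pvBks (signals.map pvType) then pvPTS n else 0)).sum :=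
    pv_sum_over_names _ (by decide) _ (PySem.Set.nodup_ofList _)
      (fun x hx => by
        rcases (pv_mem_bks _ x).mp hx with ⟨t, _, hb⟩
        exact pv_bval_mem t x hb)
  simp only [pvState, hu]
  rw [PySem.List.foldl_if_add_one, zero_add, hsum]
  have e1 : pvPTS "infra" = 25 := by decide
  have e2 : pvPTS "hiring" = 25 := by decide
  have e3 : pvPTS "growth" = 20 := by decide
  have e4 : pvPTS "integration" = 15 := by decide
  have e5 : pvPTS "launch" = 15 := by decide
  have e6 : pvPTS "sales" = 15 := by decide
  have e7 : pvPTS "pain" = 10 := by decide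
  have e8 : pvPTS "momentum" = 10 := by decide
  simp only [List.map_cons, List.map_nil, List.sum_cons, List.sum_nil,
    e1, e2, e3, e4, e5, e6, e7, e8,
    pv_bks_infra, pv_bks_hiring, pv_bks_growth, pv_bks_integration, pv_bks_launch,
    pv_bks_sales, pv_bks_pain, pv_bks_momentum]
  simp only [PySem.Set.contains, List.contains_iff_mem, PySem.Set.mem_ofList,
    Bool.or_eq_true, pv_ite_add_shift', zero_add, add_zero]
  simp only [add_assoc, or_assoc]
  rfl

-- ===== VERDICT (by name: the statement is the Claim_ definition above) =====
theorem deterministic_score_py_spec : Claim_equal_deterministic_score_py := by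
  intro company_row signals _
  unfold Spec_deterministic_score_py
  exact pv_equiv company_row signals
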